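-- pv_equiv track=rewrite | github.com/YangXiaoo/Lookoop | AlgorithmsPractice/easy/1170_easy_Compare Strings by Frequency of the Smallest Character.py | helper
-- ===== SOURCE A (Python) =====
-- def helper(words):
--     wordsMapList = []
--     for q in words:
--         tmpDicts = {}
--         for c in q:
--             tmpDicts[c] = tmpDicts.get(c, 0) + 1
--         tmpKeys = []
--         for k in tmpDicts.keys():
--             tmpKeys.append(k)
--         tmpKeys.sort()  # 字母排序
--         wordsMapList.append(tmpDicts[tmpKeys[0]])
--
--     return wordsMapList
-- ===== SOURCE B (Python) =====
-- def helper(words):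
--     res = []
--     for q in words:
--         s = sorted(q)
--         res.append(s.count(s[0]))
--     return res
-- ===== Notes on version B (the rewrite author's own statement) =====
-- stated objective: simpler
-- what changed: Replaces the per-word frequency dict plus key-list sort and dict lookup with sorting the word's characters once and counting the first (smallest) character in the sorted sequence.
-- outside the precondition, e.g. on helper(['ab', '']): A raises IndexError, B raises IndexError
import Mathlib
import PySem

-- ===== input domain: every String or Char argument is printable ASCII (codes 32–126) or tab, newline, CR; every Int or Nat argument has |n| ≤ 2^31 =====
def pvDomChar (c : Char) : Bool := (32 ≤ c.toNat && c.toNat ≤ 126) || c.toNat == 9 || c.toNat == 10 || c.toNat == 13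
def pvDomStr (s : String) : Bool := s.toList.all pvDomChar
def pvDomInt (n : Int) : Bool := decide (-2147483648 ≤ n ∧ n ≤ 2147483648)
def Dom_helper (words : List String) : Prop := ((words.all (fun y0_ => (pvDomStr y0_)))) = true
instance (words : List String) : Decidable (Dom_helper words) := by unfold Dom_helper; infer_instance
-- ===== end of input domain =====

-- B sorts each word's characters once and counts the smallest character directly,
-- instead of A's per-word frequency dict + key-list sort + dict lookup (objective: simpler).
-- Both Pythons raise IndexError on an empty word; Pre_ excludes words containing "".

-- ===== PORT A =====
-- for q in words: build a counter dict by insert, collect keys, sort them, look up the first key.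
def helper (words : List String) : List Int :=
  words.foldl (fun wordsMapList q =>
    let tmpDicts : PySem.Dict Char Int :=
      q.toList.foldl (fun d c => d.insert c (d.getD c 0 + 1)) PySem.Dict.empty
    let tmpKeys := tmpDicts.keys.foldl (fun ks k => ks ++ [k]) ([] : List Char)
    let sortedKeys := PySem.List.sorted tmpKeys (fun x => x) false
    match sortedKeys with
    | [] => wordsMapList      -- unreachable under Pre_: Python raises IndexError on tmpKeys[0]
    | k :: _ => wordsMapList ++ [tmpDicts.getD k 0]) []

-- ===== PORT B =====
-- for q in words: s = sorted(q); append s.count(s[0]).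
def helper_alt (words : List String) : List Int :=
  words.foldl (fun res q =>
    let s := PySem.List.sorted q.toList (fun x => x) false
    match s with
    | [] => res               -- unreachable under Pre_: Python raises IndexError on s[0]
    | c :: _ => res ++ [(s.count c : Int)]) []

-- ===== PRECONDITION & SPEC =====
-- Pre_ excludes lists containing an empty word: there both A and B raise IndexError.
def Pre_helper (words : List String) : Prop := ∀ q ∈ words, q.toList ≠ []
instance (words : List String) : Decidable (Pre_helper words) := by unfold Pre_helper; infer_instance
def pvWitness_helper : List String := (["abc", "aab", "zz"])

def Spec_helper (words : List String) (out : List Int) : Prop := out = helper_alt words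
instance (words : List String) (out : List Int) : Decidable (Spec_helper words out) := by unfold Spec_helper; infer_instance

-- ===== CLAIM (what is proved, stated in full; the proofs are below) =====
def Claim_equal_helper : Prop := ∀ (words : List String), Dom_helper words → Pre_helper words → Spec_helper words (helper words)

-- ===== LEMMAS AND PROOFS =====

-- The value A appends for one nonempty word equals the value B appends.
lemma step_eq (q : String) (hq : q.toList ≠ []) (acc : List Int) :
    (let tmpDicts : PySem.Dict Char Int :=
      q.toList.foldl (fun d c => d.insert c (d.getD c 0 + 1)) PySem.Dict.empty
     let tmpKeys := tmpDicts.keys.foldl (fun ks k => ks ++ [k]) ([] : List Char)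
     let sortedKeys := PySem.List.sorted tmpKeys (fun x => x) false
     match sortedKeys with
     | [] => acc
     | k :: _ => acc ++ [tmpDicts.getD k 0]) =
    (let s := PySem.List.sorted q.toList (fun x => x) false
     match s with
     | [] => acc
     | c :: _ => acc ++ [(s.count c : Int)]) := by
  simp only [PySem.List.foldl_append_singleton_eq_self, List.nil_append]
  have hkeys : (q.toList.foldl (fun d c => d.insert c (d.getD c 0 + 1))
      (PySem.Dict.empty : PySem.Dict Char Int)).keys = PySem.Set.ofList q.toList := by
    rw [PySem.Dict.keys_foldl_insert]
    simp [PySem.Dict.keys_empty, PySem.Set.update, PySem.Set.ofList_eq_foldl]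
  rw [hkeys]
  -- B's sorted word is nonempty
  obtain ⟨c, t, hs⟩ : ∃ c t, PySem.List.sorted q.toList (fun x => x) false = c :: t := by
    rcases h : PySem.List.sorted q.toList (fun x => x) false with _ | ⟨c, t⟩
    · have hp := PySem.List.sorted_perm q.toList (fun x : Char => x) false
      rw [h] at hp
      exact absurd hp.nil_eq.symm hq
    · exact ⟨c, t, rfl⟩
  -- A's sorted key list is nonempty
  obtain ⟨k, u, hk⟩ : ∃ k u,
      PySem.List.sorted (PySem.Set.ofList q.toList) (fun x => x) false = k :: u := by
    rcases h : PySem.List.sorted (PySem.Set.ofList q.toList) (fun x => x) false with _ | ⟨k, u⟩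
    · have hp := PySem.List.sorted_perm (PySem.Set.ofList q.toList) (fun x : Char => x) false
      rw [h] at hp
      obtain ⟨a, ha⟩ := List.exists_mem_of_ne_nil _ hq
      have hm := (PySem.Set.mem_ofList q.toList a).mpr ha
      rw [← hp.nil_eq] at hm
      simp at hm
    · exact ⟨k, u, rfl⟩
  rw [hs, hk]
  -- the two heads are the same character: each is the minimum of q's characters
  have hkmem : k ∈ q.toList := by
    have hmem := (PySem.List.mem_sorted (xs := PySem.Set.ofList q.toList)
      (key := fun x : Char => x) (rev := false) (x := k))
    rw [hk] at hmem
    exact (PySem.Set.mem_ofList q.toList k).mp (hmem.mp (by simp))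
  have hcmem : c ∈ q.toList := by
    have hmem := (PySem.List.mem_sorted (xs := q.toList)
      (key := fun x : Char => x) (rev := false) (x := c))
    rw [hs] at hmem
    exact hmem.mp (by simp)
  have hkc : k = c := by
    have h1 : k ≤ c := PySem.List.key_head_sorted_le _ (fun x : Char => x) hk c
      ((PySem.Set.mem_ofList q.toList c).mpr hcmem)
    have h2 : c ≤ k := PySem.List.key_head_sorted_le _ (fun x : Char => x) hs k hkmem
    exact le_antisymm h1 h2
  -- A's dict value and B's count both equal q.toList.count c
  have hA : (q.toList.foldl (fun d c => d.insert c (d.getD c 0 + 1))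
      (PySem.Dict.empty : PySem.Dict Char Int)).getD k 0 = (q.toList.count k : Int) := by
    rw [PySem.Dict.getD_foldl_insert_add_one]
    simp [PySem.Dict.getD_empty]
  have hB : (c :: t).count c = q.toList.count c := by
    have hp : (c :: t).Perm q.toList := hs ▸ PySem.List.sorted_perm q.toList _ false
    exact hp.count_eq c
  show acc ++ [(q.toList.foldl (fun d c => d.insert c (d.getD c 0 + 1))
      (PySem.Dict.empty : PySem.Dict Char Int)).getD k 0] =
    acc ++ [(((c :: t).count c : Nat) : Int)]
  rw [hA, hkc, hB]

theorem helper_spec : Claim_equal_helper := by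
  intro words _ hpre
  unfold Spec_helper helper helper_alt
  apply PySem.List.foldl_congr_mem
  intro acc q hqmem
  exact step_eq q (hpre q hqmem) acc
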